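-- pv_equiv track=rewrite | github.com/DanexCodr/Coderive | benchmarks/lexer_parser/python/lexer_parser_bench.py | lex_parse
-- ===== SOURCE A (Python) =====
-- def is_alpha(c: str) -> bool:
--     return c == '_' or ('a' <= c <= 'z') or ('A' <= c <= 'Z')
--
-- def is_digit(c: str) -> bool:
--     return '0' <= c <= '9'
--
-- def lex_parse(text: str) -> int:
--     i = 0
--     n = len(text)
--     tokens = 0
--     stmts = 0
--     depth = 0
--     max_depth = 0
--     kind_sum = 0
--
--     while i < n:
--         c = text[i]
--
--         if c.isspace():
--             if c == '\n':
--                 stmts += 1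
--             i += 1
--             continue
--
--         if c == '/' and i + 1 < n and text[i + 1] == '/':
--             i += 2
--             while i < n and text[i] != '\n':
--                 i += 1
--             continue
--
--         if c == '/' and i + 1 < n and text[i + 1] == '*':
--             i += 2
--             while i + 1 < n and not (text[i] == '*' and text[i + 1] == '/'):
--                 i += 1
--             i = min(i + 2, n)
--             continue
--
--         if is_alpha(c):
--             start = i
--             i += 1
--             while i < n and (is_alpha(text[i]) or is_digit(text[i])):
--                 i += 1
--             tokens += 1
--             kind_sum += (i - start) % 97
--             continue
--
--         if is_digit(c):
--             i += 1
--             while i < n and (is_digit(text[i]) or text[i] == '.'):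
--                 i += 1
--             tokens += 1
--             kind_sum += 3
--             continue
--
--         if c == '"' or c == "'":
--             quote = c
--             i += 1
--             while i < n:
--                 d = text[i]
--                 if d == '\\':
--                     i += 2
--                     continue
--                 if d == quote:
--                     i += 1
--                     break
--                 i += 1
--             tokens += 1
--             kind_sum += 7
--             continue
--
--         if c in '([{':
--             depth += 1
--             if depth > max_depth:
--                 max_depth = depth
--         elif c in ')]}' and depth > 0:
--             depth -= 1
--
--         if c == ';':
--             stmts += 1
--
--         tokens += 1
--         kind_sum += 1
--         i += 1
--
--     return tokens * 31 + stmts * 17 + depth * 13 + max_depth * 7 + kind_sum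
-- ===== SOURCE B (Python) =====
-- def is_alpha(c: str) -> bool:
--     return c == '_' or ('a' <= c <= 'z') or ('A' <= c <= 'Z')
--
-- def is_digit(c: str) -> bool:
--     return '0' <= c <= '9'
--
-- def _scan(text):
--     """Lexing pass: same character classes and index advancement as the
--     original, but emits token records instead of updating totals."""
--     toks = []
--     i = 0
--     n = len(text)
--     while i < n:
--         c = text[i]
--         if c.isspace():
--             if c == '\n':
--                 toks.append(('nl',))
--             i += 1
--         elif c == '/' and i + 1 < n and text[i + 1] == '/':
--             i += 2
--             while i < n and text[i] != '\n':
--                 i += 1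
--         elif c == '/' and i + 1 < n and text[i + 1] == '*':
--             i += 2
--             while i + 1 < n and not (text[i] == '*' and text[i + 1] == '/'):
--                 i += 1
--             i = min(i + 2, n)
--         elif is_alpha(c):
--             start = i
--             i += 1
--             while i < n and (is_alpha(text[i]) or is_digit(text[i])):
--                 i += 1
--             toks.append(('id', i - start))
--         elif is_digit(c):
--             i += 1
--             while i < n and (is_digit(text[i]) or text[i] == '.'):
--                 i += 1
--             toks.append(('num',))
--         elif c == '"' or c == "'":
--             quote = c
--             i += 1
--             while i < n:
--                 d = text[i]
--                 if d == '\\':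
--                     i += 2
--                     continue
--                 if d == quote:
--                     i += 1
--                     break
--                 i += 1
--             toks.append(('str',))
--         else:
--             toks.append(('punct', c))
--             i += 1
--     return toks
--
-- def lex_parse(text: str) -> int:
--     tokens = stmts = depth = max_depth = kind_sum = 0
--     for t in _scan(text):
--         kind = t[0]
--         if kind == 'nl':
--             stmts += 1
--         elif kind == 'id':
--             tokens += 1
--             kind_sum += t[1] % 97
--         elif kind == 'num':
--             tokens += 1
--             kind_sum += 3
--         elif kind == 'str':
--             tokens += 1
--             kind_sum += 7
--         else:
--             c = t[1]
--             if c in '([{':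
--                 depth += 1
--                 if depth > max_depth:
--                     max_depth = depth
--             elif c in ')]}' and depth > 0:
--                 depth -= 1
--             if c == ';':
--                 stmts += 1
--             tokens += 1
--             kind_sum += 1
--     return tokens * 31 + stmts * 17 + depth * 13 + max_depth * 7 + kind_sum
-- ===== Notes on version B (the rewrite author's own statement) =====
-- stated objective: alternative
-- what changed: A computes all statistics inline inside one while-loop; B is decomposed into a lexing pass that emits a list of token records and a separate fold over that list that accumulates tokens/stmts/depth/max_depth/kind_sum.
import Mathlib
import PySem

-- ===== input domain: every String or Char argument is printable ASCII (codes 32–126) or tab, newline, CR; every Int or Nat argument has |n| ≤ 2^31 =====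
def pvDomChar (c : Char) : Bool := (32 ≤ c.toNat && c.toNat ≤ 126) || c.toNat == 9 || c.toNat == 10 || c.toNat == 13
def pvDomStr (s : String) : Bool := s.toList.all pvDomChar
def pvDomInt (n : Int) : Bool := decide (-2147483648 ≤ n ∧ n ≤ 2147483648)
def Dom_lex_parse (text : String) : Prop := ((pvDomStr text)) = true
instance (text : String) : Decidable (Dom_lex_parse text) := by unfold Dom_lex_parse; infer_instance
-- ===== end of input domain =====

-- B computes the same hash by a two-pass decomposition (lexing pass emitting token
-- records, then a fold accumulating the statistics); alternative, not faster.

-- ===== PORT A =====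
-- shared character classes (Python helpers is_alpha / is_digit; isSpaceC is
-- c.isspace(), exact on Dom's characters: space, tab, newline, CR)
def isAlphaC (c : Char) : Bool := c = '_' || ('a' ≤ c && c ≤ 'z') || ('A' ≤ c && c ≤ 'Z')
def isDigitC (c : Char) : Bool := '0' ≤ c && c ≤ '9'
def isSpaceC (c : Char) : Bool := c = ' ' || c = '\t' || c = '\n' || c = '\r'

-- inner while of the block-comment branch: skip to past "*/" (or to the end)
def skipBlock : List Char → List Char
  | a :: b :: r => if a = '*' && b = '/' then r else skipBlock (b :: r)
  | _ => []

-- inner while of the string branch: skip past the closing quote, '\' skips 2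
def skipStr (q : Char) : List Char → List Char
  | [] => []
  | d :: r => if d = '\\' then skipStr q (r.drop 1)
              else if d = q then r else skipStr q r
termination_by l => l.length
decreasing_by all_goals (simp; try omega)

-- inner while of the identifier branch: count of alnum chars consumed, rest
def spanAlnum : List Char → Nat × List Char
  | [] => (0, [])
  | c :: r => if isAlphaC c || isDigitC c then
                let p := spanAlnum r; (p.1 + 1, p.2)
              else (0, c :: r)

-- inner while of the number branch
def spanNum : List Char → Nat × List Char
  | [] => (0, [])
  | c :: r => if isDigitC c || c = '.' then
                let p := spanNum r; (p.1 + 1, p.2)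
              else (0, c :: r)

theorem skipBlock_len : ∀ l, (skipBlock l).length ≤ l.length
  | [] => by simp [skipBlock]
  | [a] => by simp [skipBlock]
  | a :: b :: r => by
      rw [skipBlock]
      split
      · simp; omega
      · have := skipBlock_len (b :: r); simpa using Nat.le_succ_of_le this

theorem skipStr_len (q : Char) : ∀ l, (skipStr q l).length ≤ l.length
  | [] => by simp [skipStr]
  | d :: r => by
      rw [skipStr]
      split
      · have := skipStr_len q (r.drop 1)
        simp at this ⊢; omega
      · split
        · simp
        · have := skipStr_len q r; simpa using Nat.le_succ_of_le this
termination_by l => l.length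
decreasing_by all_goals (simp; try omega)

theorem spanAlnum_len : ∀ l, (spanAlnum l).2.length ≤ l.length
  | [] => by simp [spanAlnum]
  | c :: r => by
      rw [spanAlnum]
      split
      · have := spanAlnum_len r; simpa using Nat.le_succ_of_le this
      · simp

theorem spanNum_len : ∀ l, (spanNum l).2.length ≤ l.length
  | [] => by simp [spanNum]
  | c :: r => by
      rw [spanNum]
      split
      · have := spanNum_len r; simpa using Nat.le_succ_of_le this
      · simp

theorem dropWhile_len {p : Char → Bool} (l : List Char) :
    (List.dropWhile p l).length ≤ l.length := List.length_dropWhile_le ..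

-- A's while loop, one recursive step per iteration of the outer while
def lexA : List Char → Int → Int → Int → Int → Int → Int
  | [], tokens, stmts, depth, maxd, kind =>
      tokens * 31 + stmts * 17 + depth * 13 + maxd * 7 + kind
  | c :: rest, tokens, stmts, depth, maxd, kind =>
      if isSpaceC c then
        lexA rest tokens (if c = '\n' then stmts + 1 else stmts) depth maxd kind
      else if c = '/' && rest.head? = some '/' then
        lexA (List.dropWhile (· ≠ '\n') (rest.drop 1)) tokens stmts depth maxd kind
      else if c = '/' && rest.head? = some '*' then
        lexA (skipBlock (rest.drop 1)) tokens stmts depth maxd kind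
      else if isAlphaC c then
        lexA (spanAlnum rest).2 (tokens + 1) stmts depth maxd
          (kind + ((1 + ((spanAlnum rest).1 : Int)) % 97))
      else if isDigitC c then
        lexA (spanNum rest).2 (tokens + 1) stmts depth maxd (kind + 3)
      else if c = '"' || c = '\'' then
        lexA (skipStr c rest) (tokens + 1) stmts depth maxd (kind + 7)
      else
        lexA rest (tokens + 1) (if c = ';' then stmts + 1 else stmts)
          (if c = '(' || c = '[' || c = '{' then depth + 1
           else if (c = ')' || c = ']' || c = '}') && depth > 0 then depth - 1 else depth)
          (if (c = '(' || c = '[' || c = '{') && depth + 1 > maxd then depth + 1 else maxd)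
          (kind + 1)
termination_by l => l.length
decreasing_by
  all_goals simp
  · have := dropWhile_len (p := (· ≠ '\n')) (rest.drop 1)
    simp at this ⊢; omega
  · have := skipBlock_len (rest.drop 1)
    simp at this ⊢; omega
  · have := spanAlnum_len rest; omega
  · have := spanNum_len rest; omega
  · have := skipStr_len c rest; omega

def lex_parse (text : String) : Int := lexA text.toList 0 0 0 0 0

-- ===== PORT B =====
-- token records emitted by B's lexing pass
inductive Tok
  | nl
  | id (len : Nat)
  | num
  | str
  | punct (c : Char)
deriving DecidableEq, Repr

-- B's lexing pass (_scan): same scanning, but emits token records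
def scanB : List Char → List Tok
  | [] => []
  | c :: rest =>
      if isSpaceC c then
        if c = '\n' then Tok.nl :: scanB rest else scanB rest
      else if c = '/' && rest.head? = some '/' then
        scanB (List.dropWhile (· ≠ '\n') (rest.drop 1))
      else if c = '/' && rest.head? = some '*' then
        scanB (skipBlock (rest.drop 1))
      else if isAlphaC c then
        Tok.id (1 + (spanAlnum rest).1) :: scanB (spanAlnum rest).2
      else if isDigitC c then
        Tok.num :: scanB (spanNum rest).2
      else if c = '"' || c = '\'' then
        Tok.str :: scanB (skipStr c rest)
      else
        Tok.punct c :: scanB rest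
termination_by l => l.length
decreasing_by
  all_goals simp
  · have := dropWhile_len (p := (· ≠ '\n')) (rest.drop 1)
    simp at this ⊢; omega
  · have := skipBlock_len (rest.drop 1)
    simp at this ⊢; omega
  · have := spanAlnum_len rest; omega
  · have := spanNum_len rest; omega
  · have := skipStr_len c rest; omega

-- B's fold over the token records (one step of the for-loop body)
def stepTok : Tok → Int × Int × Int × Int × Int → Int × Int × Int × Int × Int
  | Tok.nl, (tokens, stmts, depth, maxd, kind) => (tokens, stmts + 1, depth, maxd, kind)
  | Tok.id len, (tokens, stmts, depth, maxd, kind) =>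
      (tokens + 1, stmts, depth, maxd, kind + ((len : Int) % 97))
  | Tok.num, (tokens, stmts, depth, maxd, kind) => (tokens + 1, stmts, depth, maxd, kind + 3)
  | Tok.str, (tokens, stmts, depth, maxd, kind) => (tokens + 1, stmts, depth, maxd, kind + 7)
  | Tok.punct c, (tokens, stmts, depth, maxd, kind) =>
      (tokens + 1, if c = ';' then stmts + 1 else stmts,
       (if c = '(' || c = '[' || c = '{' then depth + 1
        else if (c = ')' || c = ']' || c = '}') && depth > 0 then depth - 1 else depth),
       (if (c = '(' || c = '[' || c = '{') && depth + 1 > maxd then depth + 1 else maxd),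
       kind + 1)

def lex_parse_alt (text : String) : Int :=
  let p := (scanB text.toList).foldl (fun st t => stepTok t st) (0, 0, 0, 0, 0)
  p.1 * 31 + p.2.1 * 17 + p.2.2.1 * 13 + p.2.2.2.1 * 7 + p.2.2.2.2

-- ===== PRECONDITION & SPEC =====
def Spec_lex_parse (text : String) (out : Int) : Prop := out = lex_parse_alt text
instance (text : String) (out : Int) : Decidable (Spec_lex_parse text out) := by unfold Spec_lex_parse; infer_instance

-- ===== CLAIM (what is proved, stated in full; the proofs are below) =====
def Claim_equal_lex_parse : Prop := ∀ (text : String), Dom_lex_parse text → Spec_lex_parse text (lex_parse text)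

-- ===== LEMMAS AND PROOFS =====
def finishTok (p : Int × Int × Int × Int × Int) : Int :=
  p.1 * 31 + p.2.1 * 17 + p.2.2.1 * 13 + p.2.2.2.1 * 7 + p.2.2.2.2

theorem lexA_eq_fold (cs : List Char) (tokens stmts depth maxd kind : Int) :
    lexA cs tokens stmts depth maxd kind =
      finishTok ((scanB cs).foldl (fun st t => stepTok t st) (tokens, stmts, depth, maxd, kind)) := by
  fun_induction lexA cs tokens stmts depth maxd kind with
  | case1 => simp [scanB, finishTok]
  | case2 c rest tokens stmts depth maxd kind h ih =>
      rw [scanB]; by_cases hn : c = '\n' <;> simp [h, hn, stepTok] at ih ⊢ <;> exact ih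
  | case3 c rest tokens stmts depth maxd kind h1 h2 ih =>
      rw [scanB]; simp [h1, h2] at ih ⊢; exact ih
  | case4 c rest tokens stmts depth maxd kind h1 h2 h3 ih =>
      rw [scanB]; simp [h1, h2, h3] at ih ⊢; exact ih
  | case5 c rest tokens stmts depth maxd kind h1 h2 h3 h4 ih =>
      rw [scanB]; simp [h1, h2, h3, h4, stepTok] at ih ⊢
      exact ih
  | case6 c rest tokens stmts depth maxd kind h1 h2 h3 h4 h5 ih =>
      rw [scanB]; simp [h1, h2, h3, h4, h5, stepTok] at ih ⊢; exact ih
  | case7 c rest tokens stmts depth maxd kind h1 h2 h3 h4 h5 h6 ih =>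
      rw [scanB]; simp [h1, h2, h3, h4, h5, h6, stepTok] at ih ⊢; exact ih
  | case8 c rest tokens stmts depth maxd kind h1 h2 h3 h4 h5 h6 ih =>
      rw [scanB]; simp [h1, h2, h3, h4, h5, h6, stepTok] at ih ⊢; exact ih

-- ===== VERDICT (by name: the statement is the Claim_ definition above) =====
theorem lex_parse_spec : Claim_equal_lex_parse := by
  intro text _
  unfold Spec_lex_parse lex_parse lex_parse_alt
  simpa [finishTok] using lexA_eq_fold text.toList 0 0 0 0 0
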